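-- pv_equiv track=rewrite | github.com/MarquesAnderson/js-pde-translator | variables.py | trimStringLeft
-- ===== SOURCE A (Python) =====
-- def trimStringLeft(toTrim, trimIndex):
--     currentIndex = -1
--     cutString = ""
--     for letter in toTrim:
--         currentIndex += 1
--         if currentIndex >= trimIndex:
--             cutString += letter
--     return cutString
-- ===== SOURCE B (Python) =====
-- def trimStringLeft(toTrim, trimIndex):
--     return toTrim[max(trimIndex, 0):]
-- ===== Notes on version B (the rewrite author's own statement) =====
-- stated objective: simpler
-- what changed: Replaced the per-character index/accumulator loop with a single closed-form slice toTrim[max(trimIndex,0):].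
import Mathlib
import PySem

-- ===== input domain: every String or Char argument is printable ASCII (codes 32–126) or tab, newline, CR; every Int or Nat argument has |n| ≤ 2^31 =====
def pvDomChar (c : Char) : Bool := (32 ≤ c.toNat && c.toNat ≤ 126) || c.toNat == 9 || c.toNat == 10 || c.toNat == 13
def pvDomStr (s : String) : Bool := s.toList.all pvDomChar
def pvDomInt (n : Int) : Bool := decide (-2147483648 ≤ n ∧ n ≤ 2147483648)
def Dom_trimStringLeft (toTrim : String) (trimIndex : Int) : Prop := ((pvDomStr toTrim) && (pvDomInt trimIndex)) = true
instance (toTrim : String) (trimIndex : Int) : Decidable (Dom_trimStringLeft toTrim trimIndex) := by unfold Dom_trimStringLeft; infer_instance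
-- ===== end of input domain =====

-- B replaces A's per-character index/accumulator loop with one closed-form slice; objective: simpler.

-- ===== PORT A =====
-- the for-loop of A: state = (currentIndex, cutString), processed char by char
def trimA_loop (trimIndex : Int) : List Char → Int → List Char → List Char
  | [], _, acc => acc
  | c :: rest, idx, acc =>
      let idx' := idx + 1
      trimA_loop trimIndex rest idx' (if idx' ≥ trimIndex then acc ++ [c] else acc)

def trimStringLeft (toTrim : String) (trimIndex : Int) : String :=
  String.mk (trimA_loop trimIndex toTrim.toList (-1) [])

-- ===== PORT B =====
-- toTrim[max(trimIndex, 0):]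
def trimStringLeft_alt (toTrim : String) (trimIndex : Int) : String :=
  String.mk (PySem.List.slice toTrim.toList (some (max trimIndex 0)) none)

-- ===== PRECONDITION & SPEC =====
def Spec_trimStringLeft (toTrim : String) (trimIndex : Int) (out : String) : Prop := out = trimStringLeft_alt toTrim trimIndex
instance (toTrim : String) (trimIndex : Int) (out : String) : Decidable (Spec_trimStringLeft toTrim trimIndex out) := by unfold Spec_trimStringLeft; infer_instance

-- ===== CLAIM (what is proved, stated in full; the proofs are below) =====
def Claim_equal_trimStringLeft : Prop := ∀ (toTrim : String) (trimIndex : Int), Dom_trimStringLeft toTrim trimIndex → Spec_trimStringLeft toTrim trimIndex (trimStringLeft toTrim trimIndex)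

-- ===== LEMMAS AND PROOFS =====
theorem trimA_loop_eq (trimIndex : Int) (l : List Char) : ∀ (idx : Int) (acc : List Char),
    trimA_loop trimIndex l idx acc = acc ++ l.drop (trimIndex - (idx + 1)).toNat := by
  induction l with
  | nil => intro idx acc; simp [trimA_loop]
  | cons c rest ih =>
      intro idx acc
      simp only [trimA_loop, ih]
      by_cases h : idx + 1 ≥ trimIndex
      · have h1 : (trimIndex - (idx + 1)).toNat = 0 := by omega
        have h2 : (trimIndex - (idx + 1 + 1)).toNat = 0 := by omega
        simp [h, h1, h2]
      · have h1 : (trimIndex - (idx + 1)).toNat = (trimIndex - (idx + 1 + 1)).toNat + 1 := by omega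
        simp [h, h1]

theorem trimStringLeft_spec : Claim_equal_trimStringLeft := by
  unfold Claim_equal_trimStringLeft Spec_trimStringLeft
  intro toTrim trimIndex _
  unfold trimStringLeft trimStringLeft_alt
  have hm : max trimIndex 0 = ((trimIndex.toNat : Nat) : Int) := by omega
  rw [trimA_loop_eq, hm, PySem.List.slice_from_natCast]
  simp
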